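-- pv_equiv track=rewrite | github.com/daniel-reich/ubiquitous-fiesta | 9fbbjaLt22Zfvjjau_18.py | paul_cipher
-- ===== SOURCE A (Python) =====
-- uppercase = "ABCDEFGHIJKLMNOPQRSTUVWXYZ"
--
-- def paul_cipher(txt):
--   result, char = '', False
--   for i in txt.upper():
--     if i in uppercase and not char:
--       result += i
--       char = i
--     elif i in uppercase:
--       if uppercase.find(char)+uppercase.find(i)+1 >= len(uppercase):
--         result += uppercase[uppercase.find(char)+uppercase.find(i)+1-26]
--         char = i
--       else:
--         result += uppercase[uppercase.find(char)+uppercase.find(i)+1]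
--         char = i
--     else:result += i
--   return result
-- ===== SOURCE B (Python) =====
-- uppercase = "ABCDEFGHIJKLMNOPQRSTUVWXYZ"
--
-- def paul_cipher(txt):
--   s = txt.upper()
--   letters = [c for c in s if c in uppercase]
--   transformed = letters[:1]
--   for prev, cur in zip(letters, letters[1:]):
--     transformed.append(uppercase[(uppercase.index(prev) + uppercase.index(cur) + 1) % 26])
--   it = iter(transformed)
--   return ''.join(next(it) if c in uppercase else c for c in s)
-- ===== Notes on version B (the rewrite author's own statement) =====
-- stated objective: alternative
-- what changed: A's single stateful loop carrying the previous letter and an if/else overflow adjustment is replaced by two passes: build the transformed-letter stream from consecutive letter pairs (zip) with a (pos(prev)+pos(cur)+1) % 26 closed form, then merge it back over the non-letter characters.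
import Mathlib
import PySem

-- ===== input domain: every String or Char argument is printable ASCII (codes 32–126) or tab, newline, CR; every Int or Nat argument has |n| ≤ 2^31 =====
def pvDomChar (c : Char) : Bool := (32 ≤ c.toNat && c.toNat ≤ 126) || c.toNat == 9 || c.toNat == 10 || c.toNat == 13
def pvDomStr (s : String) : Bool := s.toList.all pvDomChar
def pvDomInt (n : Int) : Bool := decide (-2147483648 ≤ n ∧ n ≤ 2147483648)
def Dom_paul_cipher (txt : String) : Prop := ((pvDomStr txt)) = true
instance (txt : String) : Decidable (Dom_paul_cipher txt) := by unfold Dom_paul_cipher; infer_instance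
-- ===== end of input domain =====

-- B replaces A's single stateful fold by two passes: build the transformed-letter
-- stream from consecutive letter pairs (zip) with a (…+…+1) % 26 closed form, then
-- merge it back over the non-letters (objective: alternative decomposition).

-- the module constant `uppercase`
def pcUp : List Char := "ABCDEFGHIJKLMNOPQRSTUVWXYZ".toList

-- ===== PORT A =====
-- one step of A's loop; state = (result, char) with `char = False` ported as `none`
-- (in Python the `elif` can only run with `char` a letter, so the branch test
--  `i in uppercase and not char` / `elif i in uppercase` is the match below)
def paulStepA (st : List Char × Option Char) (i : Char) : List Char × Option Char :=
  if PySem.Chars.isIn [i] pcUp then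
    match st.2 with
    | none => (st.1 ++ [i], some i)
    | some c =>
      if PySem.Chars.find pcUp [c] + PySem.Chars.find pcUp [i] + 1 ≥ (pcUp.length : Int) then
        (st.1 ++ [PySem.List.pyGetD pcUp (PySem.Chars.find pcUp [c] + PySem.Chars.find pcUp [i] + 1 - 26) ' '], some i)
      else
        (st.1 ++ [PySem.List.pyGetD pcUp (PySem.Chars.find pcUp [c] + PySem.Chars.find pcUp [i] + 1) ' '], some i)
  else (st.1 ++ [i], st.2)

def paul_cipher (txt : String) : String :=
  String.ofList ((PySem.Str.upper txt).toList.foldl paulStepA ([], none)).1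

-- ===== PORT B =====
-- uppercase[(uppercase.index(prev)+uppercase.index(cur)+1) % 26]  (indices exist: both are letters)
def pcEnc (p c : Char) : Char :=
  PySem.List.pyGetD pcUp (PySem.Int.mod (PySem.Chars.find pcUp [p] + PySem.Chars.find pcUp [c] + 1) 26) ' '

-- transformed = letters[:1] + [enc(prev,cur) for prev,cur in zip(letters, letters[1:])]
def pcTransform : List Char → List Char
  | [] => []
  | l :: ls => l :: (List.zip (l :: ls) ls).map (fun pc => pcEnc pc.1 pc.2)

-- the final join: emit the next transformed letter at letter positions, copy the rest
-- (`ts.headD c` is unreachable filler: ts is never exhausted while a letter remains)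
def pcMerge : List Char → List Char → List Char
  | [], _ => []
  | c :: cs, ts =>
    if PySem.Chars.isIn [c] pcUp then ts.headD c :: pcMerge cs ts.tail
    else c :: pcMerge cs ts

def paul_cipher_alt (txt : String) : String :=
  let s := (PySem.Str.upper txt).toList
  let letters := s.filter (fun c => PySem.Chars.isIn [c] pcUp)
  String.ofList (pcMerge s (pcTransform letters))

-- ===== PRECONDITION & SPEC =====
def Spec_paul_cipher (txt : String) (out : String) : Prop := out = paul_cipher_alt txt
instance (txt : String) (out : String) : Decidable (Spec_paul_cipher txt out) := by unfold Spec_paul_cipher; infer_instance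

-- ===== CLAIM (what is proved, stated in full; the proofs are below) =====
def Claim_equal_paul_cipher : Prop := ∀ (txt : String), Dom_paul_cipher txt → Spec_paul_cipher txt (paul_cipher txt)

-- ===== LEMMAS AND PROOFS =====

-- proof-side recursion: the transformed stream starting from an optional previous letter
def tfFrom : Option Char → List Char → List Char
  | _, [] => []
  | none, l :: ls => l :: tfFrom (some l) ls
  | some p, l :: ls => pcEnc p l :: tfFrom (some l) ls

theorem tfFrom_some (p : Char) (ls : List Char) :
    tfFrom (some p) ls = (List.zip (p :: ls) ls).map (fun pc => pcEnc pc.1 pc.2) := by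
  induction ls generalizing p with
  | nil => rfl
  | cons l ls ih => simp [tfFrom, ih l, List.zip]

theorem pcTransform_eq_tfFrom (ls : List Char) : pcTransform ls = tfFrom none ls := by
  cases ls with
  | nil => rfl
  | cons l ls => simp [pcTransform, tfFrom, tfFrom_some]

theorem pcFind_lt (c : Char) : PySem.Chars.find pcUp [c] < 26 := by
  by_cases h : PySem.Chars.find pcUp [c] = -1
  · rw [h]; norm_num
  · have h0 : 0 ≤ PySem.Chars.find pcUp [c] := by
      have := PySem.Chars.neg_one_le_find (s := pcUp) (sub := [c]); omega
    have hle : PySem.Chars.find pcUp [c] ≤ (pcUp.length : Int) :=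
      PySem.Chars.find_le_length (s := pcUp) (sub := [c])
    have hlen : pcUp.length = 26 := by decide
    by_contra hge
    have heq : PySem.Chars.find pcUp [c] = 26 := by omega
    have hspec := (PySem.Chars.find_spec (s := pcUp) (sub := [c]) h0).1
    rw [heq] at hspec
    have : pcUp.drop ((26 : Int)).toNat = [] := by decide
    rw [this] at hspec
    exact absurd (List.prefix_nil.mp hspec) (by simp)

theorem pcFind_nonneg (c : Char) (h : PySem.Chars.isIn [c] pcUp = true) :
    0 ≤ PySem.Chars.find pcUp [c] :=
  (PySem.Chars.find_nonneg_iff (s := pcUp) (sub := [c])).mpr ((PySem.Chars.isIn_iff_infix (sub := [c]) (s := pcUp)).mp h)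

theorem pcEnc_eq_ifForm (p c : Char) (hc : PySem.Chars.isIn [c] pcUp = true) :
    pcEnc p c =
      if PySem.Chars.find pcUp [p] + PySem.Chars.find pcUp [c] + 1 ≥ (pcUp.length : Int) then
        PySem.List.pyGetD pcUp (PySem.Chars.find pcUp [p] + PySem.Chars.find pcUp [c] + 1 - 26) ' '
      else
        PySem.List.pyGetD pcUp (PySem.Chars.find pcUp [p] + PySem.Chars.find pcUp [c] + 1) ' ' := by
  have hp1 : -1 ≤ PySem.Chars.find pcUp [p] := PySem.Chars.neg_one_le_find pcUp [p]
  have hp2 : PySem.Chars.find pcUp [p] < 26 := pcFind_lt p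
  have hc1 : 0 ≤ PySem.Chars.find pcUp [c] := pcFind_nonneg c hc
  have hc2 : PySem.Chars.find pcUp [c] < 26 := pcFind_lt c
  have hlen : (pcUp.length : Int) = 26 := by decide
  set k : Int := PySem.Chars.find pcUp [p] + PySem.Chars.find pcUp [c] + 1 with hk
  have hmod : PySem.Int.mod k 26 = if k ≥ (pcUp.length : Int) then k - 26 else k := by
    rw [PySem.Int.mod_eq_emod_of_pos (by norm_num), hlen]
    split_ifs with h <;> omega
  unfold pcEnc
  rw [← hk, hmod]
  split_ifs <;> rfl

-- the loop invariant: A's fold from any state = prefix ++ the merged two-pass result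
theorem foldA_eq_merge (s : List Char) (res : List Char) (char : Option Char) :
    (s.foldl paulStepA (res, char)).1 =
      res ++ pcMerge s (tfFrom char (s.filter (fun c => PySem.Chars.isIn [c] pcUp))) := by
  induction s generalizing res char with
  | nil => simp [pcMerge]
  | cons i s ih =>
    by_cases hi : PySem.Chars.isIn [i] pcUp = true
    · cases char with
      | none =>
        simp only [List.foldl_cons, paulStepA, hi, if_true, List.filter_cons, tfFrom, pcMerge,
          List.headD, List.tail]
        rw [ih]
        simp
      | some c =>
        have henc := pcEnc_eq_ifForm c i hi
        simp only [List.foldl_cons, paulStepA, hi, if_true, List.filter_cons, tfFrom, pcMerge,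
          List.headD, List.tail]
        split_ifs with h
        · rw [ih]; simp [henc, h]
        · rw [ih]; simp [henc, h]
    · simp only [List.foldl_cons, paulStepA, hi, List.filter_cons]
      rw [ih]
      simp [pcMerge, hi]

-- ===== VERDICT (by name: the statement is the Claim_ definition above) =====
theorem paul_cipher_spec : Claim_equal_paul_cipher := by
  intro txt _
  unfold Spec_paul_cipher paul_cipher paul_cipher_alt
  rw [foldA_eq_merge, ← pcTransform_eq_tfFrom]
  rfl
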